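-- pv_equiv track=rewrite | github.com/Chanwoong1/Algorithm-Study | programmers/LEVEL1/3진법 뒤집기.py | solution
-- ===== SOURCE A (Python) =====
-- def solution(n):
--     three = ''
--     while n >= 3 :  # 3진법으로 변환 후 앞뒤 반전까지
--         three += str(n % 3)
--         n = (n // 3)
--     three += str(n % 3)
--
--     ten = 0
--     for i in range(len(three) - 1, -1, -1) :    # 문자열 끝에서부터 10진법 표현 계산 시작
--         if i == len(three) - 1 :
--             ten += int(three[i])
--         else :
--             m = len(three) - 1 - i
--             ten += int(three[i]) * (3 ** m)
--
--     return ten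
-- ===== SOURCE B (Python) =====
-- def solution(n):
--     result = 0
--     while n >= 3:
--         result = result * 3 + n % 3
--         n //= 3
--     return result * 3 + n % 3
-- ===== Notes on version B (the rewrite author's own statement) =====
-- stated objective: simpler
-- what changed: Replaces A's digit-string construction plus a second exponentiation pass (3**m per digit) with a single Horner-style integer loop that accumulates the reversed base-3 value directly.
import Mathlib
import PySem

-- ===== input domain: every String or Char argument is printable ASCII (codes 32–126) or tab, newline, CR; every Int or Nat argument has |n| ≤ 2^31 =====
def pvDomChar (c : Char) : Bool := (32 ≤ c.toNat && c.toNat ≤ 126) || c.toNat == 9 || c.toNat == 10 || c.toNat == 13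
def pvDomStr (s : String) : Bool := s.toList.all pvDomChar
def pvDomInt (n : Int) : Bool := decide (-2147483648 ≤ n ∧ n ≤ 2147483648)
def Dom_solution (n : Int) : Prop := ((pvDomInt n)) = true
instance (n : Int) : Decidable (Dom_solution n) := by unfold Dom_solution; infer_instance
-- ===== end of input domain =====

-- B replaces A's digit-string construction plus a second exponentiation pass by a single
-- Horner-style integer loop accumulating the reversed base-3 value (simpler).


-- termination helper for the while loops (cited by name in decreasing_by)
theorem pvFd3_toNat_lt (n : Int) (h : 3 ≤ n) :
    (PySem.Int.floordiv n 3).toNat < n.toNat := by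
  rw [PySem.Int.floordiv_eq_ediv_of_pos (by omega)]
  omega

-- ===== PORT A =====
-- int(three[i]) where three[i] is a single digit char; never a ValueError here, getD 0 is unreachable
def pvCharInt (c : Char) : Int := (PySem.Int.ofChars? [c]).getD 0

-- while n >= 3: three += str(n % 3); n = n // 3
def solLoopA (three : List Char) (n : Int) : List Char × Int :=
  if h : 3 ≤ n then
    solLoopA (three ++ PySem.Int.toChars (PySem.Int.mod n 3)) (PySem.Int.floordiv n 3)
  else (three, n)
termination_by n.toNat
decreasing_by exact pvFd3_toNat_lt n h

def solution (n : Int) : Int :=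
  let p := solLoopA [] n
  let three := p.1 ++ PySem.Int.toChars (PySem.Int.mod p.2 3)
  let L : Int := three.length
  -- for i in range(len(three)-1, -1, -1): …   (3 ** m with m = len-1-i ≥ 0, toNat exact)
  (PySem.List.pyRange (L - 1) (-1) (-1)).foldl
    (fun ten i =>
      if i == L - 1 then ten + pvCharInt (PySem.List.pyGetD three i '0')
      else ten + pvCharInt (PySem.List.pyGetD three i '0') * 3 ^ (L - 1 - i).toNat) 0

-- ===== PORT B =====
-- while n >= 3: result = result*3 + n%3; n //= 3;  then result*3 + n%3
def solLoopB (result n : Int) : Int :=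
  if h : 3 ≤ n then
    solLoopB (result * 3 + PySem.Int.mod n 3) (PySem.Int.floordiv n 3)
  else result * 3 + PySem.Int.mod n 3
termination_by n.toNat
decreasing_by exact pvFd3_toNat_lt n h

def solution_alt (n : Int) : Int := solLoopB 0 n

-- ===== PRECONDITION & SPEC =====
def Spec_solution (n : Int) (out : Int) : Prop := out = solution_alt n
instance (n : Int) (out : Int) : Decidable (Spec_solution n out) := by unfold Spec_solution; infer_instance

-- ===== CLAIM (what is proved, stated in full; the proofs are below) =====
def Claim_equal_solution : Prop := ∀ (n : Int), Dom_solution n → Spec_solution n (solution n)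

-- ===== LEMMAS AND PROOFS =====

-- the base-3 digits of n, least significant first, as A's loop produces them
def pvDigits (n : Int) : List Int :=
  if h : 3 ≤ n then PySem.Int.mod n 3 :: pvDigits (PySem.Int.floordiv n 3)
  else [PySem.Int.mod n 3]
termination_by n.toNat
decreasing_by exact pvFd3_toNat_lt n h

def pvCh (d : Int) : Char := if d = 0 then '0' else if d = 1 then '1' else '2'

def pvRev3 (s : List Int) : Int := s.foldl (fun r d => r * 3 + d) 0

theorem pvMod3_bounds (n : Int) : 0 ≤ PySem.Int.mod n 3 ∧ PySem.Int.mod n 3 < 3 := by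
  rw [PySem.Int.mod_eq_emod_of_pos (by omega)]
  omega

theorem pvDigits_bounds (n : Int) : ∀ d ∈ pvDigits n, 0 ≤ d ∧ d < 3 := by
  intro d hd
  induction n using pvDigits.induct with
  | case1 n h ih =>
    rw [pvDigits, dif_pos h] at hd
    rcases List.mem_cons.mp hd with h1 | h2
    · simpa [h1] using pvMod3_bounds n
    · exact ih h2
  | case2 n h =>
    rw [pvDigits, dif_neg h] at hd
    simp at hd
    simpa [hd] using pvMod3_bounds n

theorem pvToChars_digit (d : Int) (h0 : 0 ≤ d) (h3 : d < 3) :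
    PySem.Int.toChars d = [pvCh d] := by
  interval_cases d <;> decide

theorem pvCharInt_ch (d : Int) (h0 : 0 ≤ d) (h3 : d < 3) :
    pvCharInt (pvCh d) = d := by
  interval_cases d <;> decide

-- A's first loop (plus the final append) produces the digit characters of n in LSB-first order
theorem pvLoopA_chars (n : Int) : ∀ acc : List Char,
    (solLoopA acc n).1 ++ PySem.Int.toChars (PySem.Int.mod (solLoopA acc n).2 3)
      = acc ++ (pvDigits n).map pvCh := by
  induction n using pvDigits.induct with
  | case1 n h ih =>
    intro acc
    rw [solLoopA, dif_pos h, pvDigits, dif_pos h]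
    rw [ih (acc ++ PySem.Int.toChars (PySem.Int.mod n 3))]
    have hb := pvMod3_bounds n
    rw [pvToChars_digit _ hb.1 hb.2]
    simp
  | case2 n h =>
    intro acc
    rw [solLoopA, dif_neg h, pvDigits, dif_neg h]
    have hb := pvMod3_bounds n
    rw [pvToChars_digit _ hb.1 hb.2]
    simp

-- Horner shift: folding from r equals r * 3^len + folding from 0
theorem pvRev3_shift (s : List Int) : ∀ r : Int,
    s.foldl (fun r d => r * 3 + d) r = r * 3 ^ s.length + pvRev3 s := by
  induction s with
  | nil => intro r; simp [pvRev3]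
  | cons c s ih =>
    intro r
    simp only [List.foldl_cons, List.length_cons, pvRev3]
    rw [ih (r * 3 + c), ih (0 * 3 + c)]
    ring

-- the positional sum with MSB-weights equals the Horner value of the reversed reading
theorem pvSum_weighted (s : List Int) :
    ((List.range s.length).map (fun k => s.getD k 0 * 3 ^ (s.length - 1 - k))).sum
      = pvRev3 s := by
  induction s with
  | nil => simp [pvRev3]
  | cons c s ih =>
    rw [List.length_cons, List.range_succ_eq_map]
    simp only [List.map_cons, List.map_map, List.sum_cons]
    have h1 : ((List.range s.length).map
        ((fun k => (c :: s).getD k 0 * 3 ^ (s.length + 1 - 1 - k)) ∘ Nat.succ)).sum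
        = ((List.range s.length).map (fun k => s.getD k 0 * 3 ^ (s.length - 1 - k))).sum := by
      apply congrArg
      apply List.map_congr_left
      intro k hk
      simp only [Function.comp, List.getD_cons_succ]
      congr 2
      omega
    rw [h1, ih]
    have : pvRev3 (c :: s) = c * 3 ^ s.length + pvRev3 s := by
      simp only [pvRev3, List.foldl_cons]
      have := pvRev3_shift s c
      simpa using this
    rw [this]
    simp

-- A's second loop over the characters of s.map pvCh computes pvRev3 s
theorem pvPass2 (s : List Int) (hs : ∀ d ∈ s, 0 ≤ d ∧ d < 3) :
    (PySem.List.pyRange ((((s.map pvCh).length : Int)) - 1) (-1) (-1)).foldl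
      (fun ten i =>
        if i == ((((s.map pvCh).length : Int)) - 1) then
          ten + pvCharInt (PySem.List.pyGetD (s.map pvCh) i '0')
        else ten + pvCharInt (PySem.List.pyGetD (s.map pvCh) i '0')
              * 3 ^ ((((s.map pvCh).length : Int)) - 1 - i).toNat) 0
      = pvRev3 s := by
  have hlen : ((s.map pvCh).length : Int) = (s.length : Int) := by simp
  -- collapse the first-iteration branch: at i = L-1 the weight is 3^0 = 1
  have hf : (fun (ten i : Int) =>
      if i == ((((s.map pvCh).length : Int)) - 1) then
        ten + pvCharInt (PySem.List.pyGetD (s.map pvCh) i '0')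
      else ten + pvCharInt (PySem.List.pyGetD (s.map pvCh) i '0')
            * 3 ^ ((((s.map pvCh).length : Int)) - 1 - i).toNat)
      = (fun ten i => ten + pvCharInt (PySem.List.pyGetD (s.map pvCh) i '0')
            * 3 ^ ((((s.map pvCh).length : Int)) - 1 - i).toNat) := by
    funext ten i
    by_cases hi : i = ((s.map pvCh).length : Int) - 1
    · simp [hi]
    · simp only [List.length_map] at hi ⊢
      simp [hi]
  rw [hf, PySem.List.foldl_add]
  have hrev : PySem.List.pyRange (((s.map pvCh).length : Int) - 1) (-1) (-1)
      = (PySem.List.pyRange 0 ((s.map pvCh).length : Int) 1).reverse := by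
    rw [PySem.List.pyRange_neg_one_eq_reverse]
    norm_num
  rw [hrev, List.map_reverse, List.sum_reverse, PySem.List.pyRange_one]
  have hnat : ((((s.map pvCh).length : Int)) - 0).toNat = s.length := by simp
  rw [hnat, List.map_map]
  rw [← pvSum_weighted s, zero_add]
  apply congrArg
  apply List.map_congr_left
  intro k hk
  have hk' : k < s.length := List.mem_range.mp hk
  simp only [Function.comp, zero_add]
  have h1 : PySem.List.pyGetD (s.map pvCh) (k : Int) '0' = pvCh s[k] := by
    rw [PySem.List.pyGetD_natCast, List.getD_eq_getElem _ _ (by simpa using hk'),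
        List.getElem_map]
  have hb := hs s[k] (List.getElem_mem hk')
  rw [h1, pvCharInt_ch _ hb.1 hb.2]
  have h2 : (((s.map pvCh).length : Int) - 1 - (k : Int)).toNat = s.length - 1 - k := by
    rw [hlen]; omega
  rw [h2, List.getD_eq_getElem _ _ (by simpa using hk')]

theorem pvA_eq (n : Int) : solution n = pvRev3 (pvDigits n) := by
  unfold solution
  have h := pvLoopA_chars n []
  simp only [List.nil_append] at h
  simp only [h]
  exact pvPass2 (pvDigits n) (pvDigits_bounds n)

theorem pvB_eq (n : Int) : solution_alt n = pvRev3 (pvDigits n) := by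
  have key : ∀ m : Int, ∀ r : Int,
      solLoopB r m = (pvDigits m).foldl (fun r d => r * 3 + d) r := by
    intro m
    induction m using pvDigits.induct with
    | case1 m h ih =>
      intro r
      rw [solLoopB, dif_pos h, pvDigits, dif_pos h, List.foldl_cons, ih]
    | case2 m h =>
      intro r
      rw [solLoopB, dif_neg h, pvDigits, dif_neg h, List.foldl_cons, List.foldl_nil]
  simpa [pvRev3] using key n 0

-- ===== VERDICT (by name: the statement is the Claim_ definition above) =====
theorem solution_spec : Claim_equal_solution := by
  intro n _
  unfold Spec_solution
  rw [pvA_eq, pvB_eq]
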